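-- pv_equiv track=rewrite | github.com/kreldjarn/split-assembled-transcriptome | splice_junctions.py | collapse_N
-- ===== SOURCE A (Python) =====
-- def collapse_N(string, k=31):
--     # Collapses arbitrary length regions of N-bases into regions of length k
--     curr = False
--     mod = []
--     counter = 0
--     for c in string:
--         if c == 'N' and curr and counter >= k:
--             continue
--         elif c == 'N':
--             curr = True
--             counter += 1
--         else:
--             curr = False
--             counter = 0
--         mod.append(c)
--     return ''.join(mod)
-- ===== SOURCE B (Python) =====
-- from itertools import groupby
--
-- def collapse_N(string, k=31):
--     # Collapses arbitrary length regions of N-bases into regions of length k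
--     parts = []
--     for c, grp in groupby(string):
--         n = len(list(grp))
--         if c == 'N':
--             parts.append('N' * min(n, k))
--         else:
--             parts.append(c * n)
--     return ''.join(parts)
-- ===== Notes on version B (the rewrite author's own statement) =====
-- stated objective: idiomatic
-- what changed: Replaces the character-by-character scan with flag/counter state by an itertools.groupby segmentation into maximal runs, capping each N-run with min(length, k).
-- intended difference: For k <= 0 on strings containing 'N', A still returns one 'N' per N-run (its counter reaches 1 before the >= k skip can fire) while B returns min(length,k) = 0 'N's, i.e. drops the run entirely, which is the intended meaning of collapsing runs to length k. — e.g. on collapse_N("ANNA", 0): A returns "ANA", B returns "AA"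
import Mathlib
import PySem

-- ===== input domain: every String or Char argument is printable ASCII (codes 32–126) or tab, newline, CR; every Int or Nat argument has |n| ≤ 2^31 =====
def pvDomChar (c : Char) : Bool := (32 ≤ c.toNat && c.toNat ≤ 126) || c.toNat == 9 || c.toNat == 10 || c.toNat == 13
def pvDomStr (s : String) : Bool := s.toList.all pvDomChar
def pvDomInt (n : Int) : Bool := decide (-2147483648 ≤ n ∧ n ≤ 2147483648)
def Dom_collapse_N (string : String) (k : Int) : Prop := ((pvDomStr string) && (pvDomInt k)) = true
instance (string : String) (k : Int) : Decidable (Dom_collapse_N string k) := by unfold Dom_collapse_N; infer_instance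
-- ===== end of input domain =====

-- B replaces A's char-by-char scan with flag/counter state by a run-segmentation
-- (itertools.groupby) that caps each maximal N-run with min(length, k); same cost, more idiomatic.

-- ===== PORT A =====
-- state = (curr, counter, mod), exactly A's loop variables
def stepA (k : Int) (s : Bool × Int × List Char) (c : Char) : Bool × Int × List Char :=
  if c == 'N' && s.1 && decide (k ≤ s.2.1) then s
  else if c == 'N' then (true, s.2.1 + 1, s.2.2 ++ [c])
  else (false, 0, s.2.2 ++ [c])

def collapse_N (string : String) (k : Int) : String :=
  String.ofList (string.toList.foldl (stepA k) (false, 0, [])).2.2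

-- ===== PORT B =====
-- groupby: maximal runs of identical characters as (char, length) pairs
def runsB : List Char → List (Char × Nat)
  | [] => []
  | c :: rest =>
    (c, (rest.takeWhile (· == c)).length + 1) :: runsB (rest.dropWhile (· == c))
termination_by l => l.length
decreasing_by
  have := List.length_dropWhile_le (· == c) rest
  simp only [List.length_cons]
  omega

def pieceB (k : Int) (p : Char × Nat) : List Char :=
  if p.1 == 'N' then List.replicate (min (p.2 : Int) k).toNat 'N'
  else List.replicate p.2 p.1

def collapse_N_alt (string : String) (k : Int) : String :=
  String.ofList (((runsB string.toList).map (pieceB k)).flatten)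

-- ===== PRECONDITION & SPEC =====
-- For k <= 0 on strings containing 'N', A still returns one 'N' per N-run (its counter reaches
-- 1 before the >= k skip can fire) while B returns min(length,k) = 0 'N's, i.e. drops the run
-- entirely, which is the intended meaning of collapsing runs to length k.
def D_collapse_N (string : String) (k : Int) : Prop := k ≤ 0 ∧ 'N' ∈ string.toList
instance (string : String) (k : Int) : Decidable (D_collapse_N string k) := by
  unfold D_collapse_N; infer_instance

def Spec_collapse_N (string : String) (k : Int) (out : String) : Prop :=
  ¬ D_collapse_N string k → out = collapse_N_alt string k
instance (string : String) (k : Int) (out : String) : Decidable (Spec_collapse_N string k out) := by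
  unfold Spec_collapse_N; infer_instance

def pvDiffWitness_collapse_N : String × Int := ("ANNA", 0)
def pvDiffWitnessOut_collapse_N : String × String := ("ANA", "AA")

-- ===== CLAIM (what is proved, stated in full; the proofs are below) =====
def Claim_unchanged_collapse_N : Prop := ∀ (string : String) (k : Int), Dom_collapse_N string k → Spec_collapse_N string k (collapse_N string k)
def Claim_changed_collapse_N : Prop := Dom_collapse_N (pvDiffWitness_collapse_N.1) (pvDiffWitness_collapse_N.2) ∧ D_collapse_N (pvDiffWitness_collapse_N.1) (pvDiffWitness_collapse_N.2) ∧ collapse_N (pvDiffWitness_collapse_N.1) (pvDiffWitness_collapse_N.2) = pvDiffWitnessOut_collapse_N.1 ∧ collapse_N_alt (pvDiffWitness_collapse_N.1) (pvDiffWitness_collapse_N.2) = pvDiffWitnessOut_collapse_N.2 ∧ pvDiffWitnessOut_collapse_N.1 ≠ pvDiffWitnessOut_collapse_N.2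
def Claim_exact_collapse_N : Prop := ∀ (string : String) (k : Int), Dom_collapse_N string k → D_collapse_N string k → collapse_N string k ≠ collapse_N_alt string k

-- ===== LEMMAS AND PROOFS =====


-- folding a block of non-'N' characters from a reset state appends them all
theorem foldA_nonN (k : Int) (g : List Char) (hg : ∀ x ∈ g, x ≠ 'N') :
    ∀ acc : List Char,
      List.foldl (stepA k) (false, 0, acc) g = (false, 0, acc ++ g) := by
  induction g with
  | nil => intro acc; simp
  | cons x t ih =>
    intro acc
    have hx : x ≠ 'N' := hg x List.mem_cons_self
    have hstep : stepA k (false, 0, acc) x = (false, 0, acc ++ [x]) := by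
      simp [stepA, hx]
    rw [List.foldl_cons, hstep, ih (fun y hy => hg y (List.mem_cons_of_mem _ hy))]
    simp

-- folding a block of 'N's with 1 ≤ j ≤ k appends 'N's up to the cap k
theorem foldA_Nrun (k : Int) (g : List Char) (hg : ∀ x ∈ g, x = 'N') :
    ∀ (j : Int) (acc : List Char), 1 ≤ j → j ≤ k →
      List.foldl (stepA k) (true, j, acc) g =
        (true, min (j + (g.length : Int)) k,
          acc ++ List.replicate (min (j + (g.length : Int)) k - j).toNat 'N') := by
  induction g with
  | nil =>
    intro j acc h1 h2
    have hm : min (j + (((0:Nat)) : Int)) k = j := by omega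
    have hz : (j - j).toNat = 0 := by omega
    simp only [List.length_nil, List.foldl_nil, hm, hz, List.replicate_zero, List.append_nil]
  | cons x t ih =>
    intro j acc h1 h2
    have hx : x = 'N' := hg x List.mem_cons_self
    subst hx
    have ht : ∀ y ∈ t, y = 'N' := fun y hy => hg y (List.mem_cons_of_mem _ hy)
    by_cases hkj : k ≤ j
    · have hstep : stepA k (true, j, acc) 'N' = (true, j, acc) := by
        simp [stepA, hkj]
      rw [List.foldl_cons, hstep, ih ht j acc h1 h2]
      have e1 : min (j + (t.length : Int)) k = min (j + ((t.length + 1 : Nat) : Int)) k := by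
        omega
      rw [e1]
      exact rfl
    · have hstep : stepA k (true, j, acc) 'N' = (true, j + 1, acc ++ ['N']) := by
        simp [stepA, hkj]
      rw [List.foldl_cons, hstep, ih ht (j + 1) (acc ++ ['N']) (by omega) (by omega)]
      have e1 : min (j + 1 + (t.length : Int)) k = min (j + ((t.length + 1 : Nat) : Int)) k := by
        omega
      have e2 : (min (j + 1 + (t.length : Int)) k - (j + 1)).toNat + 1
          = (min (j + ((t.length + 1 : Nat) : Int)) k - j).toNat := by omega
      refine Prod.ext rfl (Prod.ext ?_ ?_)
      · simpa using e1
      · show acc ++ ['N'] ++ List.replicate (min (j + 1 + (t.length : Int)) k - (j + 1)).toNat 'N'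
            = acc ++ List.replicate (min (j + ((t.length + 1 : Nat) : Int)) k - j).toNat 'N'
        rw [List.append_assoc]
        congr 1
        rw [← e2, List.replicate_succ]
        rfl

-- a list whose head (if any) is not 'N' forgets the incoming flag/counter
theorem foldA_switch (k : Int) (l : List Char) (hl : ∀ d, l.head? = some d → d ≠ 'N') :
    ∀ (b : Bool) (j : Int) (acc : List Char),
      (List.foldl (stepA k) (b, j, acc) l).2.2 = (List.foldl (stepA k) (false, 0, acc) l).2.2 := by
  cases l with
  | nil => intro b j acc; rfl
  | cons d t =>
    intro b j acc
    have hd : d ≠ 'N' := hl d rfl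
    have h1 : stepA k (b, j, acc) d = (false, 0, acc ++ [d]) := by simp [stepA, hd]
    have h2 : stepA k (false, 0, acc) d = (false, 0, acc ++ [d]) := by simp [stepA, hd]
    rw [List.foldl_cons, List.foldl_cons, h1, h2]

theorem run_replicate {g : List Char} {c : Char} (hg : ∀ x ∈ g, x = c) :
    c :: g = List.replicate (g.length + 1) c := by
  rw [List.eq_replicate_iff]
  constructor
  · simp
  · intro b hb
    rcases List.mem_cons.mp hb with h | h
    · exact h
    · exact hg b h

-- main invariant: folding A from a reset state produces B's run decomposition
theorem foldA_main (k : Int) :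
    ∀ l : List Char, ∀ acc : List Char, (1 ≤ k ∨ 'N' ∉ l) →
      (List.foldl (stepA k) (false, 0, acc) l).2.2
        = acc ++ ((runsB l).map (pieceB k)).flatten := by
  intro l
  induction l using runsB.induct with
  | case1 => intro acc _; simp [runsB]
  | case2 c rest ih =>
    intro acc hyp
    have hsplit : rest.takeWhile (· == c) ++ rest.dropWhile (· == c) = rest :=
      List.takeWhile_append_dropWhile
    set grp := rest.takeWhile (· == c) with hgrp
    set rest' := rest.dropWhile (· == c) with hrest'
    have hall : ∀ x ∈ grp, x = c := fun x hx => by simpa using List.mem_takeWhile_imp hx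
    have hmemrest' : ∀ x ∈ rest', x ∈ c :: rest := fun x hx =>
      List.mem_cons_of_mem _ ((List.dropWhile_sublist (· == c)).mem hx)
    have hheadc : ∀ d, rest'.head? = some d → (d == c) = false := by
      intro d hd
      have h := List.head?_dropWhile_not (fun x => x == c) rest
      rw [← hrest', hd] at h
      simpa using h
    have hyp' : 1 ≤ k ∨ 'N' ∉ rest' := hyp.imp id (fun h hx => h (hmemrest' _ hx))
    have hruns : runsB (c :: rest) = (c, grp.length + 1) :: runsB rest' := by
      rw [runsB.eq_def]
    have hfold1 : List.foldl (stepA k) (false, 0, acc) (c :: rest)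
        = List.foldl (stepA k) (List.foldl (stepA k) (stepA k (false, 0, acc) c) grp) rest' := by
      conv_lhs => rw [show c :: rest = c :: (grp ++ rest') from by rw [hsplit]]
      rw [List.foldl_cons, List.foldl_append]
    rw [hfold1, hruns]
    by_cases hc : c = 'N'
    · subst hc
      have hk : 1 ≤ k := by
        rcases hyp with h | h
        · exact h
        · exact absurd List.mem_cons_self h
      rw [show stepA k (false, 0, acc) 'N' = (true, 1, acc ++ ['N']) from by simp [stepA]]
      rw [foldA_Nrun k grp hall 1 (acc ++ ['N']) (by omega) hk]
      have hh : ∀ d, rest'.head? = some d → d ≠ 'N' := by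
        intro d hd he
        have := hheadc d hd
        rw [he] at this
        simp at this
      rw [foldA_switch k rest' hh]
      rw [ih (acc ++ ['N'] ++ List.replicate (min (1 + (grp.length : Int)) k - 1).toNat 'N') hyp']
      have hacc : acc ++ ['N'] ++ List.replicate (min (1 + (grp.length : Int)) k - 1).toNat 'N'
          = acc ++ List.replicate (min (((grp.length + 1 : Nat)) : Int) k).toNat 'N' := by
        rw [List.append_assoc]
        congr 1
        have e : (min (1 + (grp.length : Int)) k - 1).toNat + 1
            = (min (((grp.length + 1 : Nat)) : Int) k).toNat := by omega
        rw [← e, List.replicate_succ]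
        rfl
      rw [hacc]
      simp [pieceB, List.append_assoc]
    · have hstep : stepA k (false, 0, acc) c = (false, 0, acc ++ [c]) := by
        simp [stepA, hc]
      rw [hstep, foldA_nonN k grp (fun y hy => by rw [hall y hy]; exact hc) (acc ++ [c])]
      rw [ih (acc ++ [c] ++ grp) hyp']
      have hpiece : pieceB k (c, grp.length + 1) = c :: grp := by
        rw [pieceB, if_neg (by simp [hc])]
        exact (run_replicate hall).symm
      simp [hpiece, List.append_assoc]

-- the accumulator only grows, so membership is preserved
theorem foldA_acc_mono (k : Int) :
    ∀ (l : List Char) (s : Bool × Int × List Char), 'N' ∈ s.2.2 →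
      'N' ∈ (List.foldl (stepA k) s l).2.2 := by
  intro l
  induction l with
  | nil => intro s hs; exact hs
  | cons c t ih =>
    intro s hs
    rw [List.foldl_cons]
    apply ih
    unfold stepA
    split
    · exact hs
    · split <;> exact List.mem_append_left _ hs

-- if the input contains 'N', A's output contains 'N' (flag invariant: curr = true forces 'N' ∈ mod)
theorem foldA_hasN (k : Int) :
    ∀ (l : List Char) (s : Bool × Int × List Char),
      (s.1 = true → 'N' ∈ s.2.2) → 'N' ∈ l →
      'N' ∈ (List.foldl (stepA k) s l).2.2 := by
  intro l
  induction l with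
  | nil => intro s _ h; cases h
  | cons c t ih =>
    intro s hinv hmem
    rw [List.foldl_cons]
    by_cases hc : c = 'N'
    · subst hc
      unfold stepA
      split
      · next hguard =>
        simp at hguard
        exact foldA_acc_mono k t s (hinv hguard.1)
      · split
        · exact foldA_acc_mono k t _ (List.mem_append_right _ (by simp))
        · next h1 h2 => simp at h2
    · have hstep : stepA k s c = (false, 0, s.2.2 ++ [c]) := by
        simp [stepA, hc]
      rw [hstep]
      have hmt : 'N' ∈ t := by
        rcases List.mem_cons.mp hmem with h | h
        · exact absurd h.symm hc
        · exact h
      exact ih (false, 0, s.2.2 ++ [c]) (by intro h; cases h) hmt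

-- for k ≤ 0, B's output contains no 'N'
theorem alt_noN (k : Int) (hk : k ≤ 0) (l : List Char) :
    'N' ∉ ((runsB l).map (pieceB k)).flatten := by
  intro hmem
  rcases List.mem_flatten.mp hmem with ⟨piece, hp, hNp⟩
  rcases List.mem_map.mp hp with ⟨p, _, rfl⟩
  unfold pieceB at hNp
  split at hNp
  · have hz : (min ((p.2 : Int)) k).toNat = 0 := by omega
    rw [hz] at hNp
    cases hNp
  · next h =>
    have he := (List.mem_replicate.mp hNp).2
    exact h (by simp [← he])

-- ===== VERDICT (by name: the statement is the Claim_ definition above) =====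
theorem collapse_N_spec : Claim_unchanged_collapse_N := by
  intro s k _ hD
  have hD' : ¬ (k ≤ 0 ∧ 'N' ∈ s.toList) := hD
  have h : 1 ≤ k ∨ 'N' ∉ s.toList := by
    by_cases hN : 'N' ∈ s.toList
    · left
      by_contra hcon
      exact hD' ⟨by omega, hN⟩
    · right; exact hN
  show collapse_N s k = collapse_N_alt s k
  unfold collapse_N collapse_N_alt
  rw [foldA_main k s.toList [] h]
  simp

theorem collapse_N_changed : Claim_changed_collapse_N := by
  unfold Claim_changed_collapse_N
  refine ⟨by decide, by decide, by decide, ?_, by decide⟩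
  show collapse_N_alt "ANNA" 0 = "AA"
  have hl : runsB ['A', 'N', 'N', 'A'] = [('A', 1), ('N', 2), ('A', 1)] := by
    simp [runsB.eq_def, List.takeWhile, List.dropWhile]
  unfold collapse_N_alt
  rw [show ("ANNA" : String).toList = ['A', 'N', 'N', 'A'] from by decide, hl]
  decide

theorem collapse_N_tight : Claim_exact_collapse_N := by
  intro s k _ hD heq
  have hD' : k ≤ 0 ∧ 'N' ∈ s.toList := hD
  have hA : 'N' ∈ (List.foldl (stepA k) (false, 0, []) s.toList).2.2 :=
    foldA_hasN k s.toList (false, 0, []) (by intro h; cases h) hD'.2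
  have hB := alt_noN k hD'.1 s.toList
  unfold collapse_N collapse_N_alt at heq
  have hlist := String.ofList_inj.mp heq
  rw [hlist] at hA
  exact hB hA
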